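-- pv_equiv track=rewrite | github.com/soonkuk/stellar-brave-network | docker-compose-config/convert_env.py | groupset_to_node_validatorset
-- ===== SOURCE A (Python) =====
-- def groupset_to_node_validatorset(group_dict):
--     node_list = {}
--     for group_name in group_dict:
--         for from_node in group_dict[group_name]:
--             if from_node not in node_list:
--                 node_list.setdefault(from_node, list())
--             for to_node in group_dict[group_name]:
--                 if (to_node not in node_list[from_node]) and (to_node != from_node):
--                     node_list[from_node].append(to_node)
--
--     return node_list
-- ===== SOURCE B (Python) =====
-- def groupset_to_node_validatorset(group_dict):
--     groups = list(group_dict.values())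
--     # node order: first occurrence across all member lists
--     order = []
--     seen = set()
--     for members in groups:
--         for m in members:
--             if m not in seen:
--                 seen.add(m)
--                 order.append(m)
--     # node-major: for each node, rescan every group containing it
--     result = {}
--     for u in order:
--         adj = []
--         aseen = {u}
--         for members in groups:
--             if u in members:
--                 for v in members:
--                     if v not in aseen:
--                         aseen.add(v)
--                         adj.append(v)
--         result[u] = adj
--     return result
-- ===== Notes on version B (the rewrite author's own statement) =====
-- stated objective: alternative
-- what changed: B traverses node-major instead of A's group-major fused build: it first computes the node insertion order in one pass, then for each node rescans every group containing it, collecting neighbours with a seen-set, instead of A's per-edge linear scan of the growing adjacency list inside the group loop.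
import Mathlib
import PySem

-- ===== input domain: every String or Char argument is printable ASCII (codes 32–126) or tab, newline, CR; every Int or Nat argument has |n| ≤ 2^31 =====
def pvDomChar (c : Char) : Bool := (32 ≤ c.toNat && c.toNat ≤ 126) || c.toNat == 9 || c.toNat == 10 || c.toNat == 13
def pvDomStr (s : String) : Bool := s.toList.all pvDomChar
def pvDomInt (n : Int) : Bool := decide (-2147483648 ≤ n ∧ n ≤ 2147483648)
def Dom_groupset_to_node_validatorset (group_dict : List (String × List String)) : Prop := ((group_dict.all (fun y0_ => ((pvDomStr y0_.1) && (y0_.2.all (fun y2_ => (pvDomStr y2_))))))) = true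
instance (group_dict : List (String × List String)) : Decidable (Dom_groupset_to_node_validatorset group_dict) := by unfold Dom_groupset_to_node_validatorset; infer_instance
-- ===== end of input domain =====

-- B replaces A's group-major fused build-and-dedup by a node-major traversal: compute the
-- node order once, then for each node rescan every group containing it to collect neighbours.

-- ===== PORT A =====
-- Python A receives a dict: the association-list argument is marshalled through Python dict
-- construction (duplicate keys keep the first position, last value) — exact via Dict.ofList.
-- Inner loop 'for to_node in group_dict[group_name]: if … : node_list[from_node].append(to_node)'
-- ('append' on the stored list = Dict.modify at the present key from_node).
def pvAInner (from_node : String) (members : List String)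
    (node_list : PySem.Dict String (List String)) : PySem.Dict String (List String) :=
  members.foldl (fun nl to_node =>
    if to_node ∉ nl.getD from_node [] ∧ to_node ≠ from_node
    then nl.modify from_node [] (· ++ [to_node]) else nl) node_list

def groupset_to_node_validatorset (group_dict : List (String × List String)) : List (String × List String) :=
  let gd := PySem.Dict.ofList group_dict
  (gd.items.foldl (fun node_list g =>
      g.2.foldl (fun node_list from_node =>
        let node_list := if node_list.contains from_node then node_list
                         else node_list.setdefault from_node []
        pvAInner from_node g.2 node_list) node_list) PySem.Dict.empty).items

-- ===== PORT B =====
-- 'seen'/'aseen' are Python sets (PySem.Set); each loop carries (list, set) as a pair.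
def groupset_to_node_validatorset_alt (group_dict : List (String × List String)) : List (String × List String) :=
  let gd := PySem.Dict.ofList group_dict
  let groups := gd.values
  let order := (groups.foldl (fun (p : List String × PySem.Set String) members =>
      members.foldl (fun p m =>
        if PySem.Set.contains p.2 m then p
        else (p.1 ++ [m], PySem.Set.add p.2 m)) p) ([], PySem.Set.ofList [])).1
  (order.foldl (fun res u =>
      let aj := (groups.foldl (fun (q : List String × PySem.Set String) members =>
          if members.contains u then
            members.foldl (fun q v =>
              if PySem.Set.contains q.2 v then q
              else (q.1 ++ [v], PySem.Set.add q.2 v)) q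
          else q) ([], PySem.Set.ofList [u])).1
      res.insert u aj) PySem.Dict.empty).items

-- ===== PRECONDITION & SPEC =====
def Spec_groupset_to_node_validatorset (group_dict : List (String × List String)) (out : List (String × List String)) : Prop := out = groupset_to_node_validatorset_alt group_dict
instance (group_dict : List (String × List String)) (out : List (String × List String)) : Decidable (Spec_groupset_to_node_validatorset group_dict out) := by unfold Spec_groupset_to_node_validatorset; infer_instance

-- ===== CLAIM (what is proved, stated in full; the proofs are below) =====
def Claim_equal_groupset_to_node_validatorset : Prop := ∀ (group_dict : List (String × List String)), Dom_groupset_to_node_validatorset group_dict → Spec_groupset_to_node_validatorset group_dict (groupset_to_node_validatorset group_dict)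

-- ===== LEMMAS AND PROOFS =====

-- canonical per-node dedup-append of one member list (A's append condition)
def pvDed (u : String) (l ms : List String) : List String :=
  ms.foldl (fun l t => if t ∉ l ∧ t ≠ u then l ++ [t] else l) l

-- canonical adjacency of u over a list of member lists, continued from l
def pvAdjFrom (u : String) (l : List String) (gss : List (List String)) : List String :=
  gss.foldl (fun l ms => if u ∈ ms then pvDed u l ms else l) l

theorem pvDed_mem (u : String) (ms : List String) : ∀ (l : List String) (x : String),
    x ∈ pvDed u l ms ↔ x ∈ l ∨ (x ∈ ms ∧ x ≠ u) := by
  induction ms with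
  | nil => intro l x; simp [pvDed]
  | cons t rest ih =>
    intro l x
    show x ∈ pvDed u (if t ∉ l ∧ t ≠ u then l ++ [t] else l) rest ↔ _
    rw [ih]
    by_cases h : t ∉ l ∧ t ≠ u
    · rw [if_pos h]
      constructor
      · rintro (hx | hx)
        · rcases List.mem_append.1 hx with hx | hx
          · exact Or.inl hx
          · simp only [List.mem_singleton] at hx
            exact Or.inr ⟨hx ▸ List.mem_cons_self .., hx ▸ h.2⟩
        · exact Or.inr ⟨List.mem_cons_of_mem _ hx.1, hx.2⟩
      · rintro (hx | ⟨hx, hxu⟩)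
        · exact Or.inl (List.mem_append.2 (Or.inl hx))
        · rcases List.mem_cons.1 hx with hx | hx
          · exact Or.inl (List.mem_append.2 (Or.inr (by simp [hx])))
          · exact Or.inr ⟨hx, hxu⟩
    · rw [if_neg h]
      constructor
      · rintro (hx | hx)
        · exact Or.inl hx
        · exact Or.inr ⟨List.mem_cons_of_mem _ hx.1, hx.2⟩
      · rintro (hx | ⟨hx, hxu⟩)
        · exact Or.inl hx
        · rcases List.mem_cons.1 hx with hx | hx
          · subst hx
            rcases not_and_or.1 h with h' | h'
            · exact Or.inl (not_not.1 h')
            · exact absurd hxu (by simpa using h')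
          · exact Or.inr ⟨hx, hxu⟩

theorem pvDed_of_covered (u : String) (ms : List String) : ∀ l : List String,
    (∀ t ∈ ms, t ≠ u → t ∈ l) → pvDed u l ms = l := by
  induction ms with
  | nil => intro l _; rfl
  | cons t rest ih =>
    intro l h
    show pvDed u (if t ∉ l ∧ t ≠ u then l ++ [t] else l) rest = l
    have hcond : ¬ (t ∉ l ∧ t ≠ u) := by
      rintro ⟨h1, h2⟩; exact h1 (h t (List.mem_cons_self ..) h2)
    rw [if_neg hcond]
    exact ih l (fun t' ht' => h t' (List.mem_cons_of_mem _ ht'))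

theorem pvDed_idem (u : String) (l ms : List String) :
    pvDed u (pvDed u l ms) ms = pvDed u l ms := by
  apply pvDed_of_covered
  intro t ht htu
  exact (pvDed_mem u ms l t).2 (Or.inr ⟨ht, htu⟩)

-- A's inner scan at one from_node: keys untouched, only from_node's list extended
theorem pvAInner_spec (m : String) (ms : List String) : ∀ d : PySem.Dict String (List String),
    d.contains m = true →
    (pvAInner m ms d).keys = d.keys ∧
    ∀ k, (pvAInner m ms d).getD k [] =
      if k = m then pvDed m (d.getD m []) ms else d.getD k [] := by
  induction ms with
  | nil =>
    intro d _
    refine ⟨rfl, fun k => ?_⟩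
    by_cases hk : k = m <;> simp [pvAInner, pvDed, hk]
  | cons t rest ih =>
    intro d hc
    by_cases hcond : t ∉ d.getD m [] ∧ t ≠ m
    · have hun : pvAInner m (t :: rest) d = pvAInner m rest (d.modify m [] (· ++ [t])) := by
        simp [pvAInner, List.foldl_cons, hcond]
      have hc1 : (d.modify m [] (· ++ [t])).contains m = true := by
        rw [PySem.Dict.contains_modify]; simp
      obtain ⟨hk, hv⟩ := ih (d.modify m [] (· ++ [t])) hc1
      rw [hun]
      refine ⟨by rw [hk, PySem.Dict.keys_modify, PySem.Dict.keys_insert_of_contains _ _ hc],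
        fun k => ?_⟩
      rw [hv k]
      by_cases hkm : k = m
      · subst hkm
        rw [if_pos rfl, if_pos rfl, PySem.Dict.getD_modify_self]
        show pvDed k _ rest = pvDed k (d.getD k []) (t :: rest)
        unfold pvDed
        rw [List.foldl_cons, if_pos hcond]
      · rw [if_neg hkm, if_neg hkm, PySem.Dict.getD_modify_of_ne d _ _ hkm]
    · have hun : pvAInner m (t :: rest) d = pvAInner m rest d := by
        simp only [pvAInner, List.foldl_cons, if_neg hcond]
      obtain ⟨hk, hv⟩ := ih d hc
      rw [hun]
      refine ⟨hk, fun k => ?_⟩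
      rw [hv k]
      by_cases hkm : k = m
      · subst hkm
        rw [if_pos rfl, if_pos rfl]
        show pvDed k _ rest = pvDed k (d.getD k []) (t :: rest)
        unfold pvDed
        rw [List.foldl_cons, if_neg hcond]
      · rw [if_neg hkm, if_neg hkm]

-- A's member loop over one group
theorem pvAGroup (ms : List String) : ∀ (js : List String) (d : PySem.Dict String (List String)),
    d.keys.Nodup →
    (js.foldl (fun node_list from_node =>
        let node_list := if node_list.contains from_node then node_list
                         else node_list.setdefault from_node []
        pvAInner from_node ms node_list) d).keys = PySem.Set.update d.keys js ∧
    (js.foldl (fun node_list from_node =>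
        let node_list := if node_list.contains from_node then node_list
                         else node_list.setdefault from_node []
        pvAInner from_node ms node_list) d).keys.Nodup ∧
    ∀ u, (js.foldl (fun node_list from_node =>
        let node_list := if node_list.contains from_node then node_list
                         else node_list.setdefault from_node []
        pvAInner from_node ms node_list) d).getD u [] =
      if u ∈ js then pvDed u (d.getD u []) ms else d.getD u [] := by
  intro js
  induction js with
  | nil =>
    intro d hnd
    refine ⟨(PySem.Set.update_nil d.keys).symm, hnd, fun u => by simp⟩
  | cons m rest ih =>
    intro d hnd
    -- the state after ensuring key m
    set d0 := if d.contains m then d else d.setdefault m [] with hd0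
    have hc0 : d0.contains m = true := by
      by_cases hc : d.contains m = true
      · simp [hd0, hc]
      · simp only [Bool.not_eq_true] at hc
        rw [hd0, if_neg (by simp [hc]), PySem.Dict.setdefault_of_not_contains _ _ hc]
        exact PySem.Dict.contains_insert_self _ _ _
    have hk0 : d0.keys = PySem.Set.add d.keys m := by
      by_cases hc : d.contains m = true
      · have hm : m ∈ d.keys := (PySem.Dict.contains_iff_mem_keys d m).1 hc
        rw [hd0, if_pos hc, PySem.Set.add_of_mem hm]
      · simp only [Bool.not_eq_true] at hc
        have hm : m ∉ d.keys := fun h => by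
          have h2 := (PySem.Dict.contains_iff_mem_keys d m).2 h
          rw [hc] at h2; exact Bool.noConfusion h2
        rw [hd0, if_neg (by simp [hc]), PySem.Dict.setdefault_of_not_contains _ _ hc,
            PySem.Dict.keys_insert_of_not_contains _ _ hc, PySem.Set.add_of_not_mem hm]
    have hv0 : ∀ u, d0.getD u [] = d.getD u [] := by
      intro u
      by_cases hc : d.contains m = true
      · simp [hd0, hc]
      · simp only [Bool.not_eq_true] at hc
        rw [hd0, if_neg (by simp [hc]), PySem.Dict.setdefault_of_not_contains _ _ hc]
        by_cases hum : u = m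
        · subst hum
          rw [PySem.Dict.getD_insert_self, PySem.Dict.getD_of_not_contains _ _ hc]
        · rw [PySem.Dict.getD_insert_of_ne _ _ _ hum]
    -- the state after pvAInner m ms d0
    obtain ⟨hkI, hvI⟩ := pvAInner_spec m ms d0 hc0
    have hnd1 : (pvAInner m ms d0).keys.Nodup := by
      rw [hkI, hk0]; exact PySem.Set.nodup_add d.keys m hnd
    obtain ⟨hkr, hndr, hvr⟩ := ih (pvAInner m ms d0) hnd1
    refine ⟨?_, ?_, ?_⟩
    · rw [List.foldl_cons]
      show (rest.foldl _ (pvAInner m ms d0)).keys = _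
      rw [hkr, hkI, hk0, PySem.Set.update_cons]
    · rw [List.foldl_cons]; exact hndr
    · intro u
      rw [List.foldl_cons]
      show (rest.foldl _ (pvAInner m ms d0)).getD u [] = _
      rw [hvr u, hvI u, hv0 u, hv0 m]
      by_cases hur : u ∈ rest
      · rw [if_pos hur, if_pos (List.mem_cons_of_mem _ hur)]
        by_cases hum : u = m
        · subst hum; rw [if_pos rfl, pvDed_idem]
        · rw [if_neg hum]
      · rw [if_neg hur]
        by_cases hum : u = m
        · subst hum; rw [if_pos rfl, if_pos (List.mem_cons_self ..)]
        · rw [if_neg hum, if_neg (by simp [hum, hur])]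

-- A's whole group loop, over the list of member lists
theorem pvAOuter : ∀ (gss : List (List String)) (d : PySem.Dict String (List String)),
    d.keys.Nodup →
    (gss.foldl (fun node_list ms =>
        ms.foldl (fun node_list from_node =>
          let node_list := if node_list.contains from_node then node_list
                           else node_list.setdefault from_node []
          pvAInner from_node ms node_list) node_list) d).keys
      = gss.foldl (fun s ms => PySem.Set.update s ms) d.keys ∧
    (gss.foldl (fun node_list ms =>
        ms.foldl (fun node_list from_node =>
          let node_list := if node_list.contains from_node then node_list
                           else node_list.setdefault from_node []
          pvAInner from_node ms node_list) node_list) d).keys.Nodup ∧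
    ∀ u, (gss.foldl (fun node_list ms =>
        ms.foldl (fun node_list from_node =>
          let node_list := if node_list.contains from_node then node_list
                           else node_list.setdefault from_node []
          pvAInner from_node ms node_list) node_list) d).getD u []
      = pvAdjFrom u (d.getD u []) gss := by
  intro gss
  induction gss with
  | nil => intro d hnd; exact ⟨rfl, hnd, fun u => rfl⟩
  | cons ms rest ih =>
    intro d hnd
    obtain ⟨hk1, hnd1, hv1⟩ := pvAGroup ms ms d hnd
    obtain ⟨hkr, hndr, hvr⟩ := ih _ hnd1
    refine ⟨?_, ?_, fun u => ?_⟩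
    · rw [List.foldl_cons, hkr, hk1, List.foldl_cons]
    · rw [List.foldl_cons]; exact hndr
    · rw [List.foldl_cons, hvr u, hv1 u]
      show pvAdjFrom u _ rest = pvAdjFrom u (d.getD u []) (ms :: rest)
      unfold pvAdjFrom
      rw [List.foldl_cons]

-- B's order loop: the carried pair stays diagonal (list = set) and computes Set.update
theorem pvBOrderInner (ms : List String) : ∀ s : List String,
    ms.foldl (fun (p : List String × PySem.Set String) m =>
        if PySem.Set.contains p.2 m then p
        else (p.1 ++ [m], PySem.Set.add p.2 m)) (s, s)
      = (PySem.Set.update s ms, PySem.Set.update s ms) := by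
  induction ms with
  | nil => intro s; simp [PySem.Set.update_nil]
  | cons m rest ih =>
    intro s
    rw [List.foldl_cons, PySem.Set.update_cons]
    by_cases hm : m ∈ s
    · rw [if_pos (by rw [PySem.Set.contains_iff]; exact hm), PySem.Set.add_of_mem hm]
      exact ih s
    · rw [if_neg (by rw [PySem.Set.contains_iff]; exact hm), PySem.Set.add_of_not_mem hm]
      exact ih (s ++ [m])

theorem pvBOrder : ∀ (gss : List (List String)) (s : List String),
    gss.foldl (fun (p : List String × PySem.Set String) members =>
        members.foldl (fun p m =>
          if PySem.Set.contains p.2 m then p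
          else (p.1 ++ [m], PySem.Set.add p.2 m)) p) (s, s)
      = (gss.foldl (fun s ms => PySem.Set.update s ms) s,
         gss.foldl (fun s ms => PySem.Set.update s ms) s) := by
  intro gss
  induction gss with
  | nil => intro s; rfl
  | cons ms rest ih =>
    intro s
    rw [List.foldl_cons, pvBOrderInner ms s, ih, List.foldl_cons]

-- B's neighbour scan of one group: the seen set is u :: the collected list
theorem pvBAdjInner (u : String) (ms : List String) : ∀ l : List String,
    ms.foldl (fun (q : List String × PySem.Set String) v =>
        if PySem.Set.contains q.2 v then q
        else (q.1 ++ [v], PySem.Set.add q.2 v)) (l, u :: l)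
      = (pvDed u l ms, u :: pvDed u l ms) := by
  induction ms with
  | nil => intro l; rfl
  | cons t rest ih =>
    intro l
    rw [List.foldl_cons]
    show _ = (pvDed u (if t ∉ l ∧ t ≠ u then l ++ [t] else l) rest,
              u :: pvDed u (if t ∉ l ∧ t ≠ u then l ++ [t] else l) rest)
    by_cases h : t ∉ l ∧ t ≠ u
    · have hnm : t ∉ (u :: l) := by
        simp only [List.mem_cons, not_or]
        exact ⟨h.2, h.1⟩
      rw [if_neg (by rw [PySem.Set.contains_iff]; exact hnm),
          PySem.Set.add_of_not_mem hnm, if_pos h]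
      show rest.foldl _ (l ++ [t], (u :: l) ++ [t]) = _
      exact ih (l ++ [t])
    · have hm : t ∈ (u :: l) := by
        rcases not_and_or.1 h with h' | h'
        · exact List.mem_cons_of_mem _ (not_not.1 h')
        · simp only [ne_eq, not_not] at h'
          exact h' ▸ List.mem_cons_self ..
      rw [if_pos (by rw [PySem.Set.contains_iff]; exact hm), if_neg h]
      exact ih l

theorem pvBAdj (u : String) : ∀ (gss : List (List String)) (l : List String),
    (gss.foldl (fun (q : List String × PySem.Set String) members =>
        if members.contains u then
          members.foldl (fun q v =>
            if PySem.Set.contains q.2 v then q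
            else (q.1 ++ [v], PySem.Set.add q.2 v)) q
        else q) (l, u :: l)).1
      = pvAdjFrom u l gss := by
  intro gss
  induction gss with
  | nil => intro l; rfl
  | cons ms rest ih =>
    intro l
    rw [List.foldl_cons]
    show _ = pvAdjFrom u (if u ∈ ms then pvDed u l ms else l) rest
    by_cases hu : u ∈ ms
    · rw [if_pos (by simpa using hu), if_pos hu, pvBAdjInner u ms l]
      exact ih (pvDed u l ms)
    · rw [if_neg (by simpa using hu), if_neg hu]
      exact ih l

-- the whole equivalence, for an arbitrary marshalled dict
theorem pvMain (gd : PySem.Dict String (List String)) :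
    (gd.items.foldl (fun node_list g =>
        g.2.foldl (fun node_list from_node =>
          let node_list := if node_list.contains from_node then node_list
                           else node_list.setdefault from_node []
          pvAInner from_node g.2 node_list) node_list) PySem.Dict.empty).items
    = (((gd.values.foldl (fun (p : List String × PySem.Set String) members =>
          members.foldl (fun p m =>
            if PySem.Set.contains p.2 m then p
            else (p.1 ++ [m], PySem.Set.add p.2 m)) p) ([], PySem.Set.ofList [])).1).foldl
        (fun res u =>
          res.insert u ((gd.values.foldl (fun (q : List String × PySem.Set String) members =>
            if members.contains u then
              members.foldl (fun q v =>
                if PySem.Set.contains q.2 v then q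
                else (q.1 ++ [v], PySem.Set.add q.2 v)) q
            else q) ([], PySem.Set.ofList [u])).1)) PySem.Dict.empty).items := by
  have hA : gd.items.foldl (fun node_list g =>
      g.2.foldl (fun node_list from_node =>
        let node_list := if node_list.contains from_node then node_list
                         else node_list.setdefault from_node []
        pvAInner from_node g.2 node_list) node_list) PySem.Dict.empty
    = gd.values.foldl (fun node_list ms =>
        ms.foldl (fun node_list from_node =>
          let node_list := if node_list.contains from_node then node_list
                           else node_list.setdefault from_node []
          pvAInner from_node ms node_list) node_list) PySem.Dict.empty :=
    (List.foldl_map (f := fun g : String × List String => g.2)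
      (g := fun node_list ms =>
        ms.foldl (fun node_list from_node =>
          let node_list := if node_list.contains from_node then node_list
                           else node_list.setdefault from_node []
          pvAInner from_node ms node_list) node_list)).symm
  rw [hA]
  generalize gd.values = gss
  obtain ⟨hk, hnd, hv⟩ := pvAOuter gss PySem.Dict.empty
    (by rw [PySem.Dict.keys_empty]; exact List.nodup_nil)
  have hord : (gss.foldl (fun (p : List String × PySem.Set String) members =>
      members.foldl (fun p m =>
        if PySem.Set.contains p.2 m then p
        else (p.1 ++ [m], PySem.Set.add p.2 m)) p) ([], PySem.Set.ofList [])).1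
      = gss.foldl (fun s ms => PySem.Set.update s ms) [] :=
    congrArg Prod.fst (pvBOrder gss [])
  rw [hord]
  set order := gss.foldl (fun s ms => PySem.Set.update s ms) ([] : List String) with horder
  have hkeys : (gss.foldl (fun node_list ms =>
      ms.foldl (fun node_list from_node =>
        let node_list := if node_list.contains from_node then node_list
                         else node_list.setdefault from_node []
        pvAInner from_node ms node_list) node_list) PySem.Dict.empty).keys = order := by
    rw [hk, PySem.Dict.keys_empty]
  have hordnd : order.Nodup := hkeys ▸ hnd
  have hBitems : (order.foldl (fun res u =>
      res.insert u ((gss.foldl (fun (q : List String × PySem.Set String) members =>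
          if members.contains u then
            members.foldl (fun q v =>
              if PySem.Set.contains q.2 v then q
              else (q.1 ++ [v], PySem.Set.add q.2 v)) q
          else q) ([], PySem.Set.ofList [u])).1)) PySem.Dict.empty).items
      = order.map (fun u => (u, pvAdjFrom u [] gss)) := by
    refine Eq.trans (PySem.Dict.items_foldl_insert_fresh order (fun u => u)
        (fun u => ((gss.foldl (fun (q : List String × PySem.Set String) members =>
          if members.contains u then
            members.foldl (fun q v =>
              if PySem.Set.contains q.2 v then q
              else (q.1 ++ [v], PySem.Set.add q.2 v)) q
          else q) ([], PySem.Set.ofList [u])).1))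
        PySem.Dict.empty
        (fun a _ => PySem.Dict.contains_empty a)
        (by simpa using hordnd)) ?_
    show ([] : List (String × List String)) ++ _ = _
    rw [List.nil_append]
    exact List.map_congr_left (fun u _ => congrArg (fun l => (u, l)) (pvBAdj u gss []))
  rw [hBitems, PySem.Dict.items_eq_map_keys _ hnd ([] : List String), hkeys]
  exact List.map_congr_left (fun u _ => by rw [hv u, PySem.Dict.getD_empty])

-- ===== VERDICT (by name: the statement is the Claim_ definition above) =====
theorem groupset_to_node_validatorset_spec : Claim_equal_groupset_to_node_validatorset := by
  intro group_dict _
  show groupset_to_node_validatorset group_dict = groupset_to_node_validatorset_alt group_dict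
  exact pvMain (PySem.Dict.ofList group_dict)
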